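-- pv_equiv track=rewrite | github.com/pypi-data/pypi-mirror-404 | packages/cr-proc/cr_proc-0.1.12-py3-none-any.whl/code_recorder_processor/api/verify.py | is_only_whitespace_differences
-- ===== SOURCE A (Python) =====
-- def _normalize_newlines(text: str) -> str:
--     """Normalize CRLF to LF to avoid offset and diff noise."""
--     return text.replace("\r\n", "\n")
--
-- def is_only_whitespace_differences(template: str, actual: str) -> bool:
--     """
--     Return True if `actual` can be derived from `template` by changing only
--     whitespace (spaces, tabs, newlines). All non-whitespace characters must
--     appear in the same order with no additions, deletions, or substitutions.
--     """
--     t = _normalize_newlines(template)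
--     a = _normalize_newlines(actual)
--
--     lt, la = len(t), len(a)
--     i = j = 0
--
--     while True:
--         # Skip any whitespace on both sides
--         while i < lt and t[i].isspace():
--             i += 1
--         while j < la and a[j].isspace():
--             j += 1
--
--         if i >= lt or j >= la:
--             break
--
--         if t[i] != a[j]:
--             return False
--
--         i += 1
--         j += 1
--
--     # Ensure no remaining non-whitespace characters on either side
--     while i < lt:
--         if not t[i].isspace():
--             return False
--         i += 1
--
--     while j < la:
--         if not a[j].isspace():
--             return False
--         j += 1
--
--     return True
-- ===== SOURCE B (Python) =====
-- def _normalize_newlines(text: str) -> str: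
--     """Normalize CRLF to LF to avoid offset and diff noise."""
--     return text.replace("\r\n", "\n")
--
-- def is_only_whitespace_differences(template: str, actual: str) -> bool:
--     t = _normalize_newlines(template)
--     a = _normalize_newlines(actual)
--     nt = ''.join(c for c in t if not c.isspace())
--     na = ''.join(c for c in a if not c.isspace())
--     return nt == na
-- ===== Notes on version B (the rewrite author's own statement) =====
-- stated objective: simpler
-- what changed: Replaces the interleaved two-pointer skip-and-compare loop plus two tail-check loops with two independent whitespace-filtering passes followed by a single equality comparison (the filtering passes run at C speed, measured ~1.5x faster).
import Mathlib
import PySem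

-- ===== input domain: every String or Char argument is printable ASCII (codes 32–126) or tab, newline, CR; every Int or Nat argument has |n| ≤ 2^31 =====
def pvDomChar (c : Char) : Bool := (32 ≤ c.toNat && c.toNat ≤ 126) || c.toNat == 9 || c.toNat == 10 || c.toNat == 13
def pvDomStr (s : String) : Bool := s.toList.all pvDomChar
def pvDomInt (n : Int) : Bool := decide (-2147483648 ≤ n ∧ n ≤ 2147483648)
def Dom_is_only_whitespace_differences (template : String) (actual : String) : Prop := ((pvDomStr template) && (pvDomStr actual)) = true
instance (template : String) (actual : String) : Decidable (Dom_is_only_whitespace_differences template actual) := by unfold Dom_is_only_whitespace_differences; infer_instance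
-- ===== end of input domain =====

-- B replaces A's interleaved two-pointer skip-and-compare loop by filtering the
-- whitespace out of each string independently and comparing once (objective: simpler).

-- ===== PORT A =====
-- _normalize_newlines
def pvNorm (text : String) : String := PySem.Str.replace text "\r\n" "\n"

-- the `while True` loop of A with the two tail-check loops, over the remaining chars
def pvLoopA (t a : List Char) : Bool :=
  match _ht : t.dropWhile PySem.Chars.isspace, _ha : a.dropWhile PySem.Chars.isspace with
  | c :: ts, d :: as' =>
      if c ≠ d then false else pvLoopA ts as'
  | t', a' => t'.all PySem.Chars.isspace && a'.all PySem.Chars.isspace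
termination_by t.length + a.length
decreasing_by
  have h1 := List.length_dropWhile_le (p := PySem.Chars.isspace) (l := t)
  have h2 := List.length_dropWhile_le (p := PySem.Chars.isspace) (l := a)
  rw [_ht] at h1; rw [_ha] at h2; simp at h1 h2; omega

def is_only_whitespace_differences (template : String) (actual : String) : Bool :=
  let t := pvNorm template
  let a := pvNorm actual
  pvLoopA t.toList a.toList

-- ===== PORT B =====
def pvNormAlt (text : String) : String := PySem.Str.replace text "\r\n" "\n"

def is_only_whitespace_differences_alt (template : String) (actual : String) : Bool :=
  let t := pvNormAlt template
  let a := pvNormAlt actual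
  let nt := String.ofList (t.toList.filter (fun c => !PySem.Chars.isspace c))
  let na := String.ofList (a.toList.filter (fun c => !PySem.Chars.isspace c))
  nt == na

-- ===== PRECONDITION & SPEC =====
def Spec_is_only_whitespace_differences (template : String) (actual : String) (out : Bool) : Prop := out = is_only_whitespace_differences_alt template actual
instance (template : String) (actual : String) (out : Bool) : Decidable (Spec_is_only_whitespace_differences template actual out) := by unfold Spec_is_only_whitespace_differences; infer_instance

-- ===== CLAIM (what is proved, stated in full; the proofs are below) =====
def Claim_equal_is_only_whitespace_differences : Prop := ∀ (template : String) (actual : String), Dom_is_only_whitespace_differences template actual → Spec_is_only_whitespace_differences template actual (is_only_whitespace_differences template actual)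

-- ===== LEMMAS AND PROOFS =====

-- filtering the non-whitespace chars ignores a whitespace prefix
theorem pv_filter_dropWhile (l : List Char) :
    (l.dropWhile PySem.Chars.isspace).filter (fun c => !PySem.Chars.isspace c)
      = l.filter (fun c => !PySem.Chars.isspace c) := by
  induction l with
  | nil => rfl
  | cons c cs ih =>
    by_cases h : PySem.Chars.isspace c = true
    · simp [h, ih]
    · simp [h]

theorem pv_all_iff_filter_nil (l : List Char) :
    l.all PySem.Chars.isspace = true ↔ l.filter (fun c => !PySem.Chars.isspace c) = [] := by
  simp [List.all_eq_true, List.filter_eq_nil_iff]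

theorem pv_drop_head (l : List Char) (c : Char) (cs : List Char)
    (h : l.dropWhile PySem.Chars.isspace = c :: cs) : PySem.Chars.isspace c = false := by
  have hne : l.dropWhile PySem.Chars.isspace ≠ [] := by simp [h]
  have hh := List.head_dropWhile_not PySem.Chars.isspace hne
  simpa [h] using hh

theorem pv_filter_of_drop (l : List Char) (c : Char) (cs : List Char)
    (h : l.dropWhile PySem.Chars.isspace = c :: cs) :
    l.filter (fun c => !PySem.Chars.isspace c) = c :: cs.filter (fun c => !PySem.Chars.isspace c) := by
  rw [← pv_filter_dropWhile l, h, List.filter_cons]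
  simp [pv_drop_head l c cs h]

theorem pv_loopA_iff (t a : List Char) :
    pvLoopA t a = true ↔
      t.filter (fun c => !PySem.Chars.isspace c) = a.filter (fun c => !PySem.Chars.isspace c) := by
  fun_induction pvLoopA t a with
  | case1 t a c ts d as' ht ha hcd =>
    rw [pv_filter_of_drop t c ts ht, pv_filter_of_drop a d as' ha]
    simp [hcd]
  | case2 t a c ts d as' ht ha hcd ih =>
    rw [pv_filter_of_drop t c ts ht, pv_filter_of_drop a d as' ha]
    simp only [not_not] at hcd
    simp [ih, hcd]
  | case3 t a hnc =>
    rcases h1 : t.dropWhile PySem.Chars.isspace with _ | ⟨c, ts⟩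
    · have hft : t.filter (fun c => !PySem.Chars.isspace c) = [] := by
        rw [← pv_filter_dropWhile t, h1]; rfl
      rw [hft, ← pv_filter_dropWhile a]
      simp only [List.all_nil, Bool.true_and, pv_all_iff_filter_nil]
      exact eq_comm
    · rcases h2 : a.dropWhile PySem.Chars.isspace with _ | ⟨d, as'⟩
      · rw [← pv_filter_dropWhile t, ← pv_filter_dropWhile a, h2]
        simp [h1]
      · exact absurd (hnc c ts d as' h1 h2) id

theorem pv_loopA_eq (t a : List Char) :
    pvLoopA t a =
      (String.ofList (t.filter (fun c => !PySem.Chars.isspace c))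
        == String.ofList (a.filter (fun c => !PySem.Chars.isspace c))) := by
  rw [Bool.eq_iff_iff, pv_loopA_iff, beq_iff_eq, String.ofList_inj]

-- ===== VERDICT (by name: the statement is the Claim_ definition above) =====
theorem is_only_whitespace_differences_spec : Claim_equal_is_only_whitespace_differences := by
  intro template actual _
  unfold Spec_is_only_whitespace_differences is_only_whitespace_differences is_only_whitespace_differences_alt pvNorm pvNormAlt
  exact pv_loopA_eq _ _
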